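-- pv_equiv track=rewrite | github.com/log5r/BenzaitenAdlib | benzaitencore.py | calc_durations
-- ===== SOURCE A (Python) =====
-- def calc_durations(target_note_num_list):
--     note_num_list = target_note_num_list
--     note_nums_length = len(note_num_list)
--     duration = [1] * note_nums_length
--     for i in range(note_nums_length):
--         k = 1
--         while i + k < note_nums_length:
--             merge_condition = [
--                 note_num_list[i] == note_num_list[i + k],
--                 note_num_list[i + k] == 0
--             ]
--             if note_num_list[i] > 0 and any(merge_condition):
--                 note_num_list[i + k] = 0
--                 duration[i] += 1
--             else:
--                 break
--             k += 1
--     return duration, note_num_list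
-- ===== SOURCE B (Python) =====
-- def calc_durations(target_note_num_list):
--     n = len(target_note_num_list)
--     duration = [1] * n
--     anchor = None  # index of the currently open (positive) note, or None
--     for j in range(n):
--         v = target_note_num_list[j]
--         if anchor is not None and (v == target_note_num_list[anchor] or v == 0):
--             target_note_num_list[j] = 0
--             duration[anchor] += 1
--         elif v > 0:
--             anchor = j
--         else:
--             anchor = None
--     return duration, target_note_num_list
-- ===== Notes on version B (the rewrite author's own statement) =====
-- stated objective: simpler
-- what changed: Replaced A's nested for-loop with an inner while/break merge scan by a single flat forward pass that keeps an optional anchor index: each position either extends the current anchor's run (zeroing itself and bumping the anchor's duration), opens a new anchor, or clears it.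
import Mathlib
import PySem

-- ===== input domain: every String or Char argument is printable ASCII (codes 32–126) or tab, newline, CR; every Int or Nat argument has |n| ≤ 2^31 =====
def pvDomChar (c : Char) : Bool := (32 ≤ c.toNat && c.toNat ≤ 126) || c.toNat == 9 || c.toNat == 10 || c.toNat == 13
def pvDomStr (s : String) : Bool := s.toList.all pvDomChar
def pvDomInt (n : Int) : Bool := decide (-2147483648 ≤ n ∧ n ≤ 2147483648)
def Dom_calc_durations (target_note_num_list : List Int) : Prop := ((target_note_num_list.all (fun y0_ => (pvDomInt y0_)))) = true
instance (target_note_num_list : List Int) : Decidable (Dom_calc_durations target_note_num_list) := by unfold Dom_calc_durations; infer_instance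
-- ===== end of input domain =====

-- B replaces A's nested for/while-with-break by a single flat forward pass keeping an
-- optional anchor index (objective: simpler). Python A and B both mutate the argument
-- list in place and return it; the equivalence proved here is about the return value.

-- ===== PORT A =====
-- inner `while i + k < n` loop of A; all index accesses are in range in Python, so getD 0 is exact
def calcA_inner (notes dur : List Int) (i k n : Nat) : List Int × List Int :=
  if _h : i + k < n then
    if notes.getD i 0 > 0 ∧ (notes.getD i 0 = notes.getD (i + k) 0 ∨ notes.getD (i + k) 0 = 0) then
      calcA_inner (notes.set (i + k) 0) (dur.set i (dur.getD i 0 + 1)) i (k + 1) n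
    else (notes, dur)
  else (notes, dur)
termination_by n - (i + k)
decreasing_by omega

-- outer `for i in range(n)` loop of A
def calcA_outer (notes dur : List Int) (i n : Nat) : List Int × List Int :=
  if _h : i < n then
    let p := calcA_inner notes dur i 1 n
    calcA_outer p.1 p.2 (i + 1) n
  else (notes, dur)
termination_by n - i
decreasing_by omega

def calc_durations (target_note_num_list : List Int) : List Int × List Int :=
  let n := target_note_num_list.length
  let p := calcA_outer target_note_num_list (List.replicate n 1) 0 n
  (p.2, p.1)

-- ===== PORT B =====
-- single `for j in range(n)` pass of B with the optional anchor index
def calcB_go (notes dur : List Int) (anchor : Option Nat) (j n : Nat) : List Int × List Int :=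
  if _h : j < n then
    let v := notes.getD j 0
    match anchor with
    | some a =>
      if v = notes.getD a 0 ∨ v = 0 then
        calcB_go (notes.set j 0) (dur.set a (dur.getD a 0 + 1)) (some a) (j + 1) n
      else if v > 0 then calcB_go notes dur (some j) (j + 1) n
      else calcB_go notes dur none (j + 1) n
    | none =>
      if v > 0 then calcB_go notes dur (some j) (j + 1) n
      else calcB_go notes dur none (j + 1) n
  else (notes, dur)
termination_by n - j
decreasing_by all_goals omega

def calc_durations_alt (target_note_num_list : List Int) : List Int × List Int :=
  let n := target_note_num_list.length
  let p := calcB_go target_note_num_list (List.replicate n 1) none 0 n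
  (p.2, p.1)

-- ===== PRECONDITION & SPEC =====
def Spec_calc_durations (target_note_num_list : List Int) (out : List Int × List Int) : Prop := out = calc_durations_alt target_note_num_list
instance (target_note_num_list : List Int) (out : List Int × List Int) : Decidable (Spec_calc_durations target_note_num_list out) := by unfold Spec_calc_durations; infer_instance

-- ===== CLAIM (what is proved, stated in full; the proofs are below) =====
def Claim_equal_calc_durations : Prop := ∀ (target_note_num_list : List Int), Dom_calc_durations target_note_num_list → Spec_calc_durations target_note_num_list (calc_durations target_note_num_list)

-- ===== LEMMAS AND PROOFS =====

theorem getD_set_ne (l : List Int) (m p : Nat) (a : Int) (h : m ≠ p) :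
    (l.set m a).getD p 0 = l.getD p 0 := by
  simp [List.getD, List.getElem?_set_ne h]

theorem getD_set_zero (l : List Int) (j : Nat) : (l.set j (0 : Int)).getD j 0 = 0 := by
  simp [List.getD, List.getElem?_set]
  split <;> simp

-- A's inner loop only writes notes at indices ≥ i + k
theorem innerA_getD_lt (notes dur : List Int) (i k n : Nat) :
    ∀ p, p < i + k → (calcA_inner notes dur i k n).1.getD p 0 = notes.getD p 0 := by
  fun_induction calcA_inner notes dur i k n with
  | case1 =>
      rename_i ih
      intro p hp
      rw [ih p (by omega)]
      exact getD_set_ne _ _ _ _ (by omega)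
  | case2 => intro p hp; rfl
  | case3 => intro p hp; rfl

-- if the current head is not positive, A's outer iteration does nothing
theorem outer_skip (notes dur : List Int) (j n : Nat) (hj : j < n)
    (h0 : ¬ notes.getD j 0 > 0) :
    calcA_outer notes dur j n = calcA_outer notes dur (j + 1) n := by
  rw [calcA_outer, dif_pos hj]
  have : calcA_inner notes dur j 1 n = (notes, dur) := by
    rw [calcA_inner]
    split
    · rw [if_neg (by tauto)]
    · rfl
  simp [this]

-- simultaneous invariant: with no anchor, B's remaining pass equals A's remaining outer loop;
-- with anchor a (a < j, notes[a] > 0), B's remaining pass equals A's inner loop resumed at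
-- offset j - a followed by A's outer loop from j.
theorem main_inv (n fuel : Nat) : ∀ (j : Nat) (notes dur : List Int), n - j ≤ fuel →
    (calcB_go notes dur none j n = calcA_outer notes dur j n) ∧
    (∀ a, a < j → notes.getD a 0 > 0 →
      calcB_go notes dur (some a) j n =
        (let p := calcA_inner notes dur a (j - a) n; calcA_outer p.1 p.2 j n)) := by
  induction fuel with
  | zero =>
      intro j notes dur hf
      have hj : ¬ j < n := by omega
      constructor
      · rw [calcB_go, dif_neg hj, calcA_outer, dif_neg hj]
      · intro a ha _
        rw [calcB_go, dif_neg hj, calcA_inner, dif_neg (by omega), calcA_outer, dif_neg hj]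
  | succ f ih =>
      intro j notes dur hf
      by_cases hj : j < n
      · have hf' : n - (j + 1) ≤ f := by omega
        constructor
        · -- no anchor
          rw [calcB_go, dif_pos hj]
          by_cases hv : notes.getD j 0 > 0
          · simp only [if_pos hv]
            have h2 := (ih (j + 1) notes dur hf').2 j (by omega) hv
            rw [h2]
            conv_rhs => rw [calcA_outer, dif_pos hj]
            simp
          · simp only [if_neg hv]
            rw [(ih (j + 1) notes dur hf').1, outer_skip notes dur j n hj hv]
        · -- anchor a
          intro a ha hva
          rw [calcB_go, dif_pos hj]
          have haj : a + (j - a) = j := by omega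
          by_cases hm : notes.getD j 0 = notes.getD a 0 ∨ notes.getD j 0 = 0
          · -- merge step
            simp only [if_pos hm]
            have hva' : (notes.set j (0:Int)).getD a 0 > 0 := by
              rwa [getD_set_ne _ _ _ _ (by omega)]
            have h2 := (ih (j + 1) (notes.set j 0) (dur.set a (dur.getD a 0 + 1)) hf').2
              a (by omega) hva'
            rw [h2]
            have hinner : calcA_inner notes dur a (j - a) n =
                calcA_inner (notes.set j 0) (dur.set a (dur.getD a 0 + 1)) a (j - a + 1) n := by
              rw [calcA_inner, dif_pos (by omega)]
              rw [if_pos (by rw [haj]; exact ⟨hva, by tauto⟩)]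
              rw [haj]
            have hja : j + 1 - a = j - a + 1 := by omega
            rw [hja, ← hinner]
            have hz : (calcA_inner notes dur a (j - a) n).1.getD j 0 = 0 := by
              rw [hinner, innerA_getD_lt _ _ _ _ _ j (by omega)]
              exact getD_set_zero _ _
            exact (outer_skip _ _ j n hj (by rw [hz]; omega)).symm
          · -- run ends at j
            simp only [if_neg hm]
            have hinner : calcA_inner notes dur a (j - a) n = (notes, dur) := by
              rw [calcA_inner]
              split
              · rw [if_neg (by rw [haj]; tauto)]
              · rfl
            rw [hinner]
            by_cases hv : notes.getD j 0 > 0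
            · simp only [if_pos hv]
              have h2 := (ih (j + 1) notes dur hf').2 j (by omega) hv
              rw [h2]
              conv_rhs => rw [calcA_outer, dif_pos hj]
              simp
            · simp only [if_neg hv]
              rw [(ih (j + 1) notes dur hf').1, outer_skip notes dur j n hj hv]
      · constructor
        · rw [calcB_go, dif_neg hj, calcA_outer, dif_neg hj]
        · intro a ha _
          rw [calcB_go, dif_neg hj, calcA_inner, dif_neg (by omega), calcA_outer, dif_neg hj]

-- ===== VERDICT (by name: the statement is the Claim_ definition above) =====
theorem calc_durations_spec : Claim_equal_calc_durations := by
  intro l _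
  unfold Spec_calc_durations calc_durations calc_durations_alt
  simp only [(main_inv l.length l.length 0 l (List.replicate l.length 1) (by omega)).1]
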